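-- pv_equiv track=rewrite | github.com/JamesZwq/nclique | pivoter/proj1/autotest_out_q2/5484734_q2_autotest.py | _count_k_cores_alternative
-- ===== SOURCE A (Python) =====
-- from collections import deque
--
-- def _count_k_cores_alternative(adj_list, k):
--     n = len(adj_list)
--     if n == 0:
--         return 0
--
--     remaining = set(range(n))
--     k_core_count = 0
--
--     while remaining:
--         sub_G = {}
--         for u in remaining:
--             sub_G[u] = [v for v in adj_list[u] if v in remaining]
--
--         deleted = set()
--         vertices = deque(remaining)
--
--         while vertices:
--             u = vertices.popleft()
--             if u in deleted:
--                 continue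
--
--             current_neighbors = [v for v in sub_G[u] if v not in deleted]
--
--             if len(current_neighbors) < k:
--                 deleted.add(u)
--                 for v in current_neighbors:
--                     if v not in deleted:
--                         vertices.append(v)
--
--         k_core_vertices = remaining - deleted
--
--         if not k_core_vertices:
--             break
--
--         visited = set()
--
--         for node in k_core_vertices:
--             if node not in visited:
--                 k_core_count += 1
--                 # BFS to mark all vertices in this component
--                 queue = deque([node])
--                 visited.add(node)
--
--                 while queue:
--                     current = queue.popleft()
--                     for neighbor in sub_G[current]:
--                         if neighbor in k_core_vertices and neighbor not in visited:
--                             visited.add(neighbor)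
--                             queue.append(neighbor)
--
--         remaining = remaining - k_core_vertices
--
--     return k_core_count
-- ===== SOURCE B (Python) =====
-- def _count_k_cores_alternative(adj_list, k):
--     n = len(adj_list)
--     count = 0
--     remaining = list(range(n))
--     while remaining:
--         # k-core by simultaneous fixpoint filtering of low-degree vertices
--         core = remaining
--         while True:
--             kept = [u for u in core
--                     if sum(1 for v in adj_list[u] if 0 <= v < n and v in core) >= k]
--             if len(kept) == len(core):
--                 break
--             core = kept
--         if not core:
--             break
--         # components by frontier saturation: grow each component to a fixpoint
--         visited = []
--         for s in core:
--             if s not in visited: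
--                 count += 1
--                 comp = [s]
--                 while True:
--                     grown = list(comp)
--                     for u in comp:
--                         for v in adj_list[u]:
--                             if 0 <= v < n and v in core and v not in grown:
--                                 grown.append(v)
--                     if len(grown) == len(comp):
--                         break
--                     comp = grown
--                 visited += [x for x in comp if x not in visited]
--         remaining = [u for u in remaining if u not in core]
--     return count
-- ===== Notes on version B (the rewrite author's own statement) =====
-- stated objective: alternative
-- what changed: A's per-layer dict rebuild plus deque-driven peel (re-filter each popped vertex's live neighbours, re-enqueue them) and its queue BFS are replaced by simultaneous fixpoint filtering of low-degree vertices over index lists and component collection by frontier saturation (grow each component set to a fixpoint); Pre_ excludes asymmetric adjacency lists with a degree-reaching k, where the k-core of what is meant to be an undirected graph is order-dependent.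
-- outside the precondition, e.g. on _count_k_cores_alternative([[1], []], 1): A returns 1, B returns 0
import Mathlib
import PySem

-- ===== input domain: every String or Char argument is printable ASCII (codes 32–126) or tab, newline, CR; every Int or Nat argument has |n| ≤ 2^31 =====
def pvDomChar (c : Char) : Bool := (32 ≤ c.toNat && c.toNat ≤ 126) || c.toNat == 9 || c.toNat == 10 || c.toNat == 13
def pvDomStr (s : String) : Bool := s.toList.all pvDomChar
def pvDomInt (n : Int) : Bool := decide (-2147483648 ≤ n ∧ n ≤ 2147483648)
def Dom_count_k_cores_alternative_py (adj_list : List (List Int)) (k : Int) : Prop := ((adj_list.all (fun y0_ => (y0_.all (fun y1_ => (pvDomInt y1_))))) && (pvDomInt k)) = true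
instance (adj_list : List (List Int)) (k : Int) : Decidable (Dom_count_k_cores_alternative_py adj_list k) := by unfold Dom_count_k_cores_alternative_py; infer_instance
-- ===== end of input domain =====

-- B replaces A's queue-driven re-check peeling and per-layer dict rebuild by
-- simultaneous fixpoint filtering of low-degree vertices, and A's deque BFS by
-- frontier saturation (growing each component set to a fixpoint)
-- (objective: alternative; equal return value on symmetric inputs).

-- helper used by the termination measures of both ports' loops
theorem pv_filter_lt (del del' : List Int) (u : Int)
    (hsub : ∀ x ∈ del, x ∈ del') (hu1 : u ∉ del) (hu2 : u ∈ del') :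
    ∀ R : List Int, u ∈ R →
      (R.filter (fun v => decide (v ∉ del'))).length < (R.filter (fun v => decide (v ∉ del))).length := by
  have hmono : ∀ R : List Int,
      (R.filter (fun v => decide (v ∉ del'))).length ≤ (R.filter (fun v => decide (v ∉ del))).length := by
    intro R
    apply List.Sublist.length_le
    apply List.monotone_filter_right
    intro x hx
    simp only [decide_eq_true_eq] at hx ⊢
    exact fun h => hx (hsub x h)
  intro R
  induction R with
  | nil => intro h; cases h
  | cons a R ih =>
    intro hu
    simp only [List.filter_cons]
    rcases Decidable.em (a ∈ del) with had | had
    · have had' := hsub a had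
      rw [show (decide (a ∉ del')) = false by simp [had'],
        show (decide (a ∉ del)) = false by simp [had]]
      simp only [Bool.false_eq_true, if_false]
      have hu' : u ∈ R := by
        rcases List.mem_cons.mp hu with rfl | h
        · exact absurd had hu1
        · exact h
      exact ih hu'
    · rcases Decidable.em (a ∈ del') with had' | had'
      · rw [show (decide (a ∉ del')) = false by simp [had'],
          show (decide (a ∉ del)) = true by simp [had]]
        simp only [Bool.false_eq_true, if_false, if_true, List.length_cons]
        have := hmono R
        omega
      · rw [show (decide (a ∉ del')) = true by simp [had'],
          show (decide (a ∉ del)) = true by simp [had]]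
        simp only [if_true, List.length_cons]
        have hu' : u ∈ R := by
          rcases List.mem_cons.mp hu with rfl | h
          · exact absurd hu2 had'
          · exact h
        have := ih hu'
        omega

-- ===== PORT A =====

-- adj_list[u] (u always in range at every use site below)
def pvNbrs (adj : List (List Int)) (u : Int) : List Int := (PySem.List.pyGet? adj u).getD []

-- sub_G = {u: [v for v in adj_list[u] if v in remaining] for u in remaining}
def pvA_subG (adj : List (List Int)) (remaining : List Int) : PySem.Dict Int (List Int) :=
  remaining.foldl
    (fun d u => d.insert u ((pvNbrs adj u).filter (fun v => decide (v ∈ remaining))))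
    PySem.Dict.empty

-- inner peel loop: `while vertices: u = vertices.popleft(); …`
-- (the `u ∉ R` guard only makes the recursion total: queue entries always lie in R)
def pvA_peel (k : Int) (R : List Int) (subG : PySem.Dict Int (List Int)) :
    List Int → List Int → List Int
  | [], deleted => deleted
  | u :: queue, deleted =>
    if u ∈ deleted ∨ u ∉ R then pvA_peel k R subG queue deleted
    else
      let cur := (subG.getD u []).filter (fun v => decide (v ∉ deleted))
      if (cur.length : Int) < k then
        pvA_peel k R subG (queue ++ cur.filter (fun v => decide (v ∉ u :: deleted))) (u :: deleted)
      else pvA_peel k R subG queue deleted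
  termination_by queue deleted => ((R.filter (fun v => decide (v ∉ deleted))).length, queue.length)
  decreasing_by
  · apply Prod.Lex.right; simp
  · apply Prod.Lex.left
    exact pv_filter_lt deleted (u :: deleted) u (fun x hx => List.mem_cons_of_mem _ hx)
      (by tauto) List.mem_cons_self R (by tauto)
  · apply Prod.Lex.right; simp

-- inner neighbour scan of A's BFS:
-- `for neighbor in sub_G[current]: if neighbor in core and neighbor not in visited: …`
def pvA_scan (core : List Int) : List Int → List Int → List Int → List Int × List Int
  | [], vis, adds => (vis, adds)
  | v :: nbrs, vis, adds =>
    if v ∈ core ∧ v ∉ vis then pvA_scan core nbrs (v :: vis) (adds ++ [v])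
    else pvA_scan core nbrs vis adds

-- structure of a scan result (needed by the BFS termination measure)
theorem pvA_scan_struct (core : List Int) : ∀ (nbrs vis adds : List Int),
    ∃ new : List Int, (pvA_scan core nbrs vis adds).1 = new.reverse ++ vis ∧
      (pvA_scan core nbrs vis adds).2 = adds ++ new ∧
      ∀ x ∈ new, x ∈ core ∧ x ∉ vis ∧ x ∈ nbrs := by
  intro nbrs
  induction nbrs with
  | nil => intro vis adds; exact ⟨[], by simp [pvA_scan]⟩
  | cons v nbrs ih =>
    intro vis adds
    by_cases h : v ∈ core ∧ v ∉ vis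
    · obtain ⟨new, h1, h2, h3⟩ := ih (v :: vis) (adds ++ [v])
      refine ⟨v :: new, ?_, ?_, ?_⟩
      · simp only [pvA_scan]; rw [if_pos h, h1]; simp
      · simp only [pvA_scan]; rw [if_pos h, h2]; simp
      · intro x hx
        rcases List.mem_cons.mp hx with rfl | hx
        · exact ⟨h.1, h.2, List.mem_cons_self⟩
        · obtain ⟨c1, c2, c3⟩ := h3 x hx
          exact ⟨c1, fun hc => c2 (List.mem_cons_of_mem _ hc), List.mem_cons_of_mem _ c3⟩
    · obtain ⟨new, h1, h2, h3⟩ := ih vis adds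
      refine ⟨new, ?_, ?_, ?_⟩
      · simp only [pvA_scan]; rw [if_neg h]; exact h1
      · simp only [pvA_scan]; rw [if_neg h]; exact h2
      · intro x hx
        obtain ⟨c1, c2, c3⟩ := h3 x hx
        exact ⟨c1, c2, List.mem_cons_of_mem _ c3⟩

-- `while queue: current = queue.popleft(); <scan sub_G[current]>`
def pvA_bfs (core : List Int) (subG : PySem.Dict Int (List Int)) :
    List Int → List Int → List Int
  | [], vis => vis
  | u :: queue, vis =>
    let st := pvA_scan core (subG.getD u []) vis []
    pvA_bfs core subG (queue ++ st.2) st.1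
  termination_by queue vis => ((core.filter (fun v => decide (v ∉ vis))).length, queue.length)
  decreasing_by
  · obtain ⟨new, h1, h2, h3⟩ := pvA_scan_struct core (subG.getD u []) vis []
    rcases new with _ | ⟨x, new⟩
    · rw [h1, h2]; apply Prod.Lex.right; simp
    · apply Prod.Lex.left
      rw [h1]
      obtain ⟨c1, c2, _⟩ := h3 x List.mem_cons_self
      exact pv_filter_lt vis ((x :: new).reverse ++ vis) x
        (fun y hy => by simp [hy]) c2 (by simp) core c1

-- remaining - S (set difference on the carried vertex list)
def pvDrop (R C : List Int) : List Int := R.filter (fun u => decide (u ∉ C))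

theorem pvDrop_length_lt {R C : List Int} {x : Int} (hxc : x ∈ C) (hxr : x ∈ R) :
    (pvDrop R C).length < R.length := by
  apply List.length_filter_lt_length_iff_exists.mpr
  exact ⟨x, hxr, by simpa using hxc⟩

theorem pvDrop_subset {R C : List Int} {x : Int} (hx : x ∈ pvDrop R C) : x ∈ R :=
  List.mem_of_mem_filter hx

-- `for node in k_core_vertices: if node not in visited: count += 1; <BFS>`
def pvA_comps (core : List Int) (subG : PySem.Dict Int (List Int)) :
    List Int → List Int → Int → Int
  | [], _, cnt => cnt
  | node :: rest, vis, cnt =>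
    if node ∈ vis then pvA_comps core subG rest vis cnt
    else pvA_comps core subG rest (pvA_bfs core subG [node] (node :: vis)) (cnt + 1)

-- outer `while remaining:` loop
def pvA_layers (adj : List (List Int)) (k : Int) (remaining : List Int) (cnt : Int) : Int :=
  if h : remaining = [] then cnt
  else
    let subG := pvA_subG adj remaining
    let deleted := pvA_peel k remaining subG remaining []
    let core := pvDrop remaining deleted
    if hc : core = [] then cnt
    else
      pvA_layers adj k (pvDrop remaining core) (pvA_comps core subG core [] cnt)
  termination_by remaining.length
  decreasing_by
    obtain ⟨x, hxc⟩ := List.exists_mem_of_ne_nil _ hc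
    exact pvDrop_length_lt hxc (pvDrop_subset hxc)

def count_k_cores_alternative_py (adj_list : List (List Int)) (k : Int) : Int :=
  if adj_list.length = 0 then 0
  else pvA_layers adj_list k (PySem.List.pyRange 0 adj_list.length 1) 0

-- ===== PORT B =====

-- adj_list[u] for an index that is always in range(n) where B reads it
def pvB_adj (adj : List (List Int)) (u : Int) : List Int := adj.getD u.toNat []

-- `sum(1 for v in adj_list[u] if 0 <= v < n and v in core)`
def pvB_deg (adj : List (List Int)) (core : List Int) (u : Int) : Nat :=
  (pvB_adj adj u).countP (fun v => decide (0 ≤ v ∧ v < (adj.length : Int) ∧ v ∈ core))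

-- one filtering pass: `kept = [u for u in core if <degree in core> >= k]`
def pvB_kept (adj : List (List Int)) (k : Int) (core : List Int) : List Int :=
  core.filter (fun u => decide (k ≤ (pvB_deg adj core u : Int)))

theorem pvB_kept_length_le (adj : List (List Int)) (k : Int) (core : List Int) :
    (pvB_kept adj k core).length ≤ core.length := List.length_filter_le _ _

-- `while True: kept = …; if len(kept) == len(core): break; core = kept`
def pvB_core (adj : List (List Int)) (k : Int) (core : List Int) : List Int :=
  if hlen : (pvB_kept adj k core).length = core.length then core
  else pvB_core adj k (pvB_kept adj k core)
  termination_by core.length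
  decreasing_by
    have hle := pvB_kept_length_le adj k core
    omega

-- the fixpoint filter only removes vertices (needed by the layer termination measure)
theorem pvB_core_sublist (adj : List (List Int)) (k : Int) :
    ∀ core, List.Sublist (pvB_core adj k core) core := by
  have key : ∀ (n : Nat) (core : List Int), core.length = n →
      List.Sublist (pvB_core adj k core) core := by
    intro n
    induction n using Nat.strong_induction_on with
    | _ n ih =>
      intro core hlen
      rw [pvB_core.eq_def]
      split
      · exact List.Sublist.refl core
      · rename_i hne
        have hsubl : List.Sublist (pvB_kept adj k core) core := by
          unfold pvB_kept; exact List.filter_sublist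
        refine (ih _ ?_ _ rfl).trans hsubl
        have := pvB_kept_length_le adj k core
        unfold pvB_kept at hne this ⊢
        omega
  intro core
  exact key _ core rfl

-- `if 0 <= v < n and v in core and v not in grown: grown.append(v)`
def pvB_add1 (adj : List (List Int)) (core : List Int) (g : List Int) (v : Int) : List Int :=
  if 0 ≤ v ∧ v < (adj.length : Int) ∧ v ∈ core ∧ v ∉ g then g ++ [v] else g

-- one saturation round: `grown = list(comp); for u in comp: for v in adj_list[u]: …`
def pvB_step (adj : List (List Int)) (core comp : List Int) : List Int :=
  comp.foldl (fun g u => (pvB_adj adj u).foldl (pvB_add1 adj core) g) comp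

-- structure of one inner `for v in adj_list[u]` pass (termination of the saturation)
theorem pvB_inner_struct (adj : List (List Int)) (core : List Int) :
    ∀ (l g : List Int), ∃ adds : List Int,
      l.foldl (pvB_add1 adj core) g = g ++ adds ∧
      ∀ x ∈ adds, x ∈ core ∧ x ∉ g ∧ x ∈ l := by
  intro l
  induction l with
  | nil => intro g; exact ⟨[], by simp⟩
  | cons v l ih =>
    intro g
    by_cases h : 0 ≤ v ∧ v < (adj.length : Int) ∧ v ∈ core ∧ v ∉ g
    · obtain ⟨adds, h1, h2⟩ := ih (g ++ [v])
      refine ⟨v :: adds, ?_, ?_⟩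
      · simp only [List.foldl_cons, pvB_add1]
        rw [if_pos h, h1]
        simp
      · intro x hx
        rcases List.mem_cons.mp hx with rfl | hx
        · exact ⟨h.2.2.1, h.2.2.2, List.mem_cons_self⟩
        · obtain ⟨c1, c2, c3⟩ := h2 x hx
          refine ⟨c1, fun hc => c2 (List.mem_append_left _ hc), List.mem_cons_of_mem _ c3⟩
    · obtain ⟨adds, h1, h2⟩ := ih g
      refine ⟨adds, ?_, ?_⟩
      · simp only [List.foldl_cons, pvB_add1]
        rw [if_neg h]
        exact h1
      · intro x hx
        obtain ⟨c1, c2, c3⟩ := h2 x hx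
        exact ⟨c1, c2, List.mem_cons_of_mem _ c3⟩

-- structure of a full saturation round
theorem pvB_outer_struct (adj : List (List Int)) (core : List Int) :
    ∀ (us g : List Int), ∃ adds : List Int,
      us.foldl (fun g u => (pvB_adj adj u).foldl (pvB_add1 adj core) g) g = g ++ adds ∧
      ∀ x ∈ adds, x ∈ core ∧ x ∉ g ∧ ∃ u ∈ us, x ∈ pvB_adj adj u := by
  intro us
  induction us with
  | nil => intro g; exact ⟨[], by simp⟩
  | cons u us ih =>
    intro g
    obtain ⟨a1, h1, h2⟩ := pvB_inner_struct adj core (pvB_adj adj u) g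
    obtain ⟨a2, h3, h4⟩ := ih (g ++ a1)
    refine ⟨a1 ++ a2, ?_, ?_⟩
    · simp only [List.foldl_cons]
      rw [h1, h3, List.append_assoc]
    · intro x hx
      rcases List.mem_append.mp hx with hx | hx
      · obtain ⟨c1, c2, c3⟩ := h2 x hx
        exact ⟨c1, c2, u, List.mem_cons_self, c3⟩
      · obtain ⟨c1, c2, w, hw, hwx⟩ := h4 x hx
        exact ⟨c1, fun hc => c2 (List.mem_append_left _ hc), w, List.mem_cons_of_mem _ hw, hwx⟩

-- `while True: grown = …; if len(grown) == len(comp): break; comp = grown`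
def pvB_close (adj : List (List Int)) (core : List Int) (comp : List Int) : List Int :=
  if h : (pvB_step adj core comp).length = comp.length then comp
  else pvB_close adj core (pvB_step adj core comp)
  termination_by (core.filter (fun v => decide (v ∉ comp))).length
  decreasing_by
    obtain ⟨adds, h1, h2⟩ := pvB_outer_struct adj core comp comp
    have hstep : pvB_step adj core comp = comp ++ adds := h1
    rcases adds with _ | ⟨x, adds⟩
    · exfalso; rw [hstep] at h; simp at h
    · rw [hstep]
      obtain ⟨c1, c2, _⟩ := h2 x List.mem_cons_self
      exact pv_filter_lt comp (comp ++ x :: adds) x (fun y hy => List.mem_append_left _ hy)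
        c2 (List.mem_append_right _ List.mem_cons_self) core c1

-- `for s in core: if s not in visited: count += 1; <saturate>; visited += new part`
def pvB_comps (adj : List (List Int)) (core : List Int) (vis : List Int) (cnt : Int) :
    List Int × Int :=
  core.foldl (fun st s =>
    if s ∈ st.1 then st
    else (st.1 ++ (pvB_close adj core [s]).filter (fun x => decide (x ∉ st.1)), st.2 + 1))
    (vis, cnt)

-- `while remaining:` — layers
def pvB_layers (adj : List (List Int)) (k : Int) (remaining : List Int) (cnt : Int) : Int :=
  if h : remaining = [] then cnt
  else
    let core := pvB_core adj k remaining
    if hc : core = [] then cnt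
    else
      pvB_layers adj k (pvDrop remaining core) (pvB_comps adj core [] cnt).2
  termination_by remaining.length
  decreasing_by
    obtain ⟨x, hxc⟩ := List.exists_mem_of_ne_nil _ hc
    exact pvDrop_length_lt hxc ((pvB_core_sublist adj k remaining).subset hxc)

def count_k_cores_alternative_py_alt (adj_list : List (List Int)) (k : Int) : Int :=
  pvB_layers adj_list k (PySem.List.pyRange 0 adj_list.length 1) 0

-- ===== PRECONDITION & SPEC =====
-- Pre_ admits symmetric adjacency lists (an undirected graph: every stored in-range
-- edge u→v has its reverse) and, for any adjacency list, every k that is ≤ 0 or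
-- larger than every vertex's count of in-range neighbours (there no peeling
-- decision can differ: nothing, resp. everything, is peeled): outside Pre_ — a
-- graph with an unreciprocated in-range edge and a k some vertex's degree
-- reaches — A's result depends on its incidental processing order and B's
-- legitimately differs; neither value is specified for a k-core/component count
-- of what is meant to be an undirected graph.
def Pre_count_k_cores_alternative_py (adj_list : List (List Int)) (k : Int) : Prop :=
  (∀ i < adj_list.length, ∀ v ∈ adj_list[i]!, 0 ≤ v → v < (adj_list.length : Int) →
    (i : Int) ∈ adj_list[v.toNat]!)
  ∨ k ≤ 0
  ∨ (∀ i < adj_list.length,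
      ((adj_list[i]!.countP (fun v => decide (0 ≤ v ∧ v < (adj_list.length : Int)))) : Int) < k)
instance (adj_list : List (List Int)) (k : Int) : Decidable (Pre_count_k_cores_alternative_py adj_list k) := by
  unfold Pre_count_k_cores_alternative_py; infer_instance

def pvWitness_count_k_cores_alternative_py : List (List Int) × Int := ([[1], [0], []], 1)

def Spec_count_k_cores_alternative_py (adj_list : List (List Int)) (k : Int) (out : Int) : Prop := out = count_k_cores_alternative_py_alt adj_list k
instance (adj_list : List (List Int)) (k : Int) (out : Int) : Decidable (Spec_count_k_cores_alternative_py adj_list k out) := by unfold Spec_count_k_cores_alternative_py; infer_instance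

-- ===== CLAIM (what is proved, stated in full; the proofs are below) =====
def Claim_equal_count_k_cores_alternative_py : Prop := ∀ (adj_list : List (List Int)) (k : Int), Dom_count_k_cores_alternative_py adj_list k → Pre_count_k_cores_alternative_py adj_list k → Spec_count_k_cores_alternative_py adj_list k (count_k_cores_alternative_py adj_list k)

-- ===== LEMMAS AND PROOFS =====

-- degree of u inside the vertex list S (duplicate neighbours count with multiplicity)
def pvDeg (adj : List (List Int)) (S : List Int) (u : Int) : Nat :=
  (pvNbrs adj u).countP (fun v => decide (v ∈ S))

-- a set S of vertices all of whose members keep degree ≥ k inside S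
def pvGood (adj : List (List Int)) (k : Int) (R S : List Int) : Prop :=
  (∀ x ∈ S, x ∈ R) ∧ ∀ u ∈ S, (k : Int) ≤ (pvDeg adj S u : Int)

theorem pvDeg_mono {adj : List (List Int)} {S S' : List Int} (u : Int)
    (h : ∀ x, x ∈ S → x ∈ S') : pvDeg adj S u ≤ pvDeg adj S' u := by
  unfold pvDeg
  exact List.countP_mono_left (fun x _ hx => by simp only [decide_eq_true_eq] at hx ⊢; exact h x hx)

theorem pvDrop_mem {R C : List Int} {x : Int} : x ∈ pvDrop R C ↔ x ∈ R ∧ x ∉ C := by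
  unfold pvDrop; simp

theorem pvNbrs_eq_getElem (adj : List (List Int)) (w : Int) (hw0 : 0 ≤ w)
    (hw : w.toNat < adj.length) : pvNbrs adj w = adj[w.toNat] := by
  unfold pvNbrs
  rw [PySem.List.pyGet?_of_nonneg adj hw0, List.getElem?_eq_getElem hw]
  rfl

theorem pvB_adj_eq (adj : List (List Int)) (u : Int) (h0 : 0 ≤ u)
    (h1 : u < (adj.length : Int)) : pvB_adj adj u = pvNbrs adj u := by
  have ht : u.toNat < adj.length := by omega
  rw [pvNbrs_eq_getElem adj u h0 ht]
  unfold pvB_adj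
  exact List.getD_eq_getElem adj [] ht

-- the degree count seen by A's peel loop
theorem pvCur_deg (adj : List (List Int)) (R deleted : List Int) (u : Int) :
    (((pvNbrs adj u).filter (fun v => decide (v ∈ R))).filter
        (fun v => decide (v ∉ deleted))).length = pvDeg adj (pvDrop R deleted) u := by
  rw [List.filter_filter, ← List.countP_eq_length_filter]
  unfold pvDeg
  apply List.countP_congr
  intro x _
  simp [pvDrop_mem, and_comm]

-- dict lookups in sub_G
theorem pvA_subG_getD_not_mem (adj : List (List Int)) (f : Int → List Int) :
    ∀ (R : List Int) (d : PySem.Dict Int (List Int)) (u : Int), u ∉ R →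
      (R.foldl (fun d x => d.insert x (f x)) d).getD u [] = d.getD u [] := by
  intro R
  induction R with
  | nil => intro d u _; rfl
  | cons a R ih =>
    intro d u hu
    have hua : u ≠ a := fun h => hu (h ▸ List.mem_cons_self)
    have hu' : u ∉ R := fun h => hu (List.mem_cons_of_mem _ h)
    simp only [List.foldl_cons]
    rw [ih _ u hu']
    unfold PySem.Dict.getD
    rw [PySem.Dict.get?_insert_of_ne _ _ hua]

theorem pvA_subG_getD_mem (adj : List (List Int)) (f : Int → List Int) :
    ∀ (R : List Int) (d : PySem.Dict Int (List Int)) (u : Int), u ∈ R →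
      (R.foldl (fun d x => d.insert x (f x)) d).getD u [] = f u := by
  intro R
  induction R with
  | nil => intro d u hu; cases hu
  | cons a R ih =>
    intro d u hu
    simp only [List.foldl_cons]
    by_cases h : u ∈ R
    · exact ih _ u h
    · have hua : u = a := by
        rcases List.mem_cons.mp hu with h' | h'
        · exact h'
        · exact absurd h' h
      subst hua
      rw [pvA_subG_getD_not_mem adj f R _ u h]
      unfold PySem.Dict.getD
      rw [PySem.Dict.get?_insert_self]
      rfl

theorem pv_subG_getD (adj : List (List Int)) (R : List Int) (u : Int) (hu : u ∈ R) :
    (pvA_subG adj R).getD u [] = (pvNbrs adj u).filter (fun v => decide (v ∈ R)) := by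
  unfold pvA_subG
  exact pvA_subG_getD_mem adj _ R _ u hu

-- two sublists of a duplicate-free list with the same members are equal
theorem pv_sublist_eq : ∀ (R l₁ l₂ : List Int), l₁.Sublist R → l₂.Sublist R → R.Nodup →
    (∀ x, x ∈ l₁ ↔ x ∈ l₂) → l₁ = l₂ := by
  intro R
  induction R with
  | nil =>
    intro l₁ l₂ h₁ h₂ _ _
    rw [List.sublist_nil.mp h₁, List.sublist_nil.mp h₂]
  | cons a R ih =>
    intro l₁ l₂ h₁ h₂ hnd hmem
    have hndR : R.Nodup := (List.nodup_cons.mp hnd).2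
    have haR : a ∉ R := (List.nodup_cons.mp hnd).1
    rcases List.sublist_cons_iff.mp h₁ with hc₁ | ⟨t₁, rfl, ht₁⟩
    · rcases List.sublist_cons_iff.mp h₂ with hc₂ | ⟨t₂, rfl, ht₂⟩
      · exact ih l₁ l₂ hc₁ hc₂ hndR hmem
      · exfalso
        have : a ∈ l₁ := (hmem a).mpr List.mem_cons_self
        exact haR (hc₁.subset this)
    · rcases List.sublist_cons_iff.mp h₂ with hc₂ | ⟨t₂, rfl, ht₂⟩
      · exfalso
        have : a ∈ l₂ := (hmem a).mp List.mem_cons_self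
        exact haR (hc₂.subset this)
      · have : t₁ = t₂ := by
          apply ih t₁ t₂ ht₁ ht₂ hndR
          intro x
          constructor
          · intro hx
            have hxa : x ≠ a := fun h => haR (h ▸ ht₁.subset hx)
            have := (hmem x).mp (List.mem_cons_of_mem _ hx)
            rcases List.mem_cons.mp this with h | h
            · exact absurd h hxa
            · exact h
          · intro hx
            have hxa : x ≠ a := fun h => haR (h ▸ ht₂.subset hx)
            have := (hmem x).mpr (List.mem_cons_of_mem _ hx)
            rcases List.mem_cons.mp this with h | h
            · exact absurd h hxa
            · exact h
        rw [this]

-- ---------- A's peel loop computes the k-core ----------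

theorem pvA_peel_spec (adj : List (List Int)) (k : Int) (R : List Int)
    (subG : PySem.Dict Int (List Int))
    (hGet : ∀ u ∈ R, subG.getD u [] = (pvNbrs adj u).filter (fun v => decide (v ∈ R)))
    (hRange : ∀ x ∈ R, 0 ≤ x ∧ x < (adj.length : Int))
    (hsym : ∀ u v : Int, 0 ≤ u → u < (adj.length : Int) → v ∈ pvNbrs adj u →
      0 ≤ v → v < (adj.length : Int) → u ∈ pvNbrs adj v) :
    ∀ (queue deleted : List Int),
      (∀ w ∈ R, w ∉ deleted → ((pvDeg adj (pvDrop R deleted) w : Int) < k) → w ∈ queue) →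
      (∀ S, pvGood adj k R S → ∀ x ∈ S, x ∉ deleted) →
      (∀ w ∈ R, w ∉ pvA_peel k R subG queue deleted →
          (k : Int) ≤ (pvDeg adj (pvDrop R (pvA_peel k R subG queue deleted)) w : Int))
        ∧ (∀ S, pvGood adj k R S → ∀ x ∈ S, x ∉ pvA_peel k R subG queue deleted) := by
  intro queue deleted
  induction queue, deleted using pvA_peel.induct (k := k) (R := R) (subG := subG) with
  | case1 deleted =>
    intro hq hs
    simp only [pvA_peel]
    constructor
    · intro w hwR hwD
      by_contra hcon
      have hlt : (pvDeg adj (pvDrop R deleted) w : Int) < k := by omega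
      exact List.not_mem_nil (hq w hwR hwD hlt)
    · exact hs
  | case2 u queue deleted h ih =>
    intro hq hs
    have hrw : pvA_peel k R subG (u :: queue) deleted = pvA_peel k R subG queue deleted := by
      simp only [pvA_peel]
      rw [if_pos h]
    rw [hrw]
    apply ih
    · intro w hwR hwD hdeg
      have hwu : w ≠ u := by
        rcases h with h | h
        · intro rfl; exact hwD h
        · intro rfl; exact h hwR
      rcases List.mem_cons.mp (hq w hwR hwD hdeg) with h' | h'
      · exact absurd h' hwu
      · exact h'
    · exact hs
  | case3 u queue deleted h cur hlt ih =>
    intro hq hs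
    have hlt' : (((subG.getD u []).filter (fun v => decide (v ∉ deleted))).length : Int) < k := hlt
    push_neg at h
    obtain ⟨huD, huR⟩ := h
    have hcd : ((subG.getD u []).filter (fun v => decide (v ∉ deleted))).length
        = pvDeg adj (pvDrop R deleted) u := by
      rw [hGet u huR]
      exact pvCur_deg adj R deleted u
    have hrw : pvA_peel k R subG (u :: queue) deleted =
        pvA_peel k R subG
          (queue ++ ((subG.getD u []).filter (fun v => decide (v ∉ deleted))).filter
            (fun v => decide (v ∉ u :: deleted))) (u :: deleted) := by
      simp only [pvA_peel]
      rw [if_neg (by tauto), if_pos hlt']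
    rw [hrw]
    apply ih
    · -- re-establish the pending-queue invariant
      intro w hwR hwD' hdeg'
      have hwu : w ≠ u := fun hh => hwD' (hh ▸ List.mem_cons_self)
      have hwD : w ∉ deleted := fun hh => hwD' (List.mem_cons_of_mem _ hh)
      by_cases hdeg : (pvDeg adj (pvDrop R deleted) w : Int) < k
      · rcases List.mem_cons.mp (hq w hwR hwD hdeg) with h' | h'
        · exact absurd h' hwu
        · exact List.mem_append_left _ h'
      · -- w's degree dropped when u was deleted, so u is a stored neighbour of w
        have hunb : u ∈ pvNbrs adj w := by
          by_contra hunb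
          have : pvDeg adj (pvDrop R (u :: deleted)) w = pvDeg adj (pvDrop R deleted) w := by
            unfold pvDeg
            apply List.countP_congr
            intro x hx
            have hxu : x ≠ u := fun hh => hunb (hh ▸ hx)
            simp only [decide_eq_true_eq, pvDrop_mem, List.mem_cons]
            constructor
            · intro ⟨hxR, hxD⟩; exact ⟨hxR, fun hh => hxD (Or.inr hh)⟩
            · intro ⟨hxR, hxD⟩
              exact ⟨hxR, fun hh => by rcases hh with hh | hh; exact hxu hh; exact hxD hh⟩
          omega
        have hwnb : w ∈ pvNbrs adj u :=
          hsym w u (hRange w hwR).1 (hRange w hwR).2 hunb (hRange u huR).1 (hRange u huR).2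
        apply List.mem_append_right
        apply List.mem_filter.mpr
        refine ⟨?_, by simpa using hwD'⟩
        apply List.mem_filter.mpr
        refine ⟨?_, by simpa using hwD⟩
        rw [hGet u huR]
        exact List.mem_filter.mpr ⟨hwnb, by simpa using hwR⟩
    · -- deleting u never removes a vertex of a good set
      intro S hS x hx hmem
      rcases List.mem_cons.mp hmem with rfl | hmem'
      · have hk := hS.2 x hx
        have hmono : pvDeg adj S x ≤ pvDeg adj (pvDrop R deleted) x := by
          apply pvDeg_mono
          intro z hz
          exact pvDrop_mem.mpr ⟨hS.1 z hz, hs S hS z hz⟩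
        omega
      · exact hs S hS x hx hmem'
  | case4 u queue deleted h cur hge ih =>
    intro hq hs
    have hge' : ¬ (((subG.getD u []).filter (fun v => decide (v ∉ deleted))).length : Int) < k := hge
    push_neg at h
    obtain ⟨huD, huR⟩ := h
    have hcd : ((subG.getD u []).filter (fun v => decide (v ∉ deleted))).length
        = pvDeg adj (pvDrop R deleted) u := by
      rw [hGet u huR]
      exact pvCur_deg adj R deleted u
    have hrw : pvA_peel k R subG (u :: queue) deleted = pvA_peel k R subG queue deleted := by
      simp only [pvA_peel]
      rw [if_neg (by tauto), if_neg hge']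
    rw [hrw]
    apply ih
    · intro w hwR hwD hdeg
      rcases List.mem_cons.mp (hq w hwR hwD hdeg) with h' | h'
      · exfalso
        subst h'
        omega
      · exact h'
    · exact hs

-- consequences for the per-layer call
theorem pvA_core_spec (adj : List (List Int)) (k : Int) (R : List Int)
    (hnd : R.Nodup)
    (hRange : ∀ x ∈ R, 0 ≤ x ∧ x < (adj.length : Int))
    (hsym : ∀ u v : Int, 0 ≤ u → u < (adj.length : Int) → v ∈ pvNbrs adj u →
      0 ≤ v → v < (adj.length : Int) → u ∈ pvNbrs adj v) :
    pvGood adj k R (pvDrop R (pvA_peel k R (pvA_subG adj R) R []))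
      ∧ ∀ S, pvGood adj k R S → ∀ x ∈ S,
          x ∈ pvDrop R (pvA_peel k R (pvA_subG adj R) R []) := by
  have hGet := fun u hu => pv_subG_getD adj R u hu
  obtain ⟨h1, h2⟩ := pvA_peel_spec adj k R (pvA_subG adj R) hGet hRange hsym R []
    (fun w hw _ _ => hw) (fun S _ x _ => List.not_mem_nil)
  constructor
  · constructor
    · intro x hx; exact (pvDrop_mem.mp hx).1
    · intro u hu
      obtain ⟨huR, huD⟩ := pvDrop_mem.mp hu
      exact h1 u huR huD
  · intro S hS x hx
    exact pvDrop_mem.mpr ⟨hS.1 x hx, h2 S hS x hx⟩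

-- ---------- B's fixpoint filter computes the k-core ----------

theorem pvB_deg_eq (adj : List (List Int)) (core : List Int) (u : Int)
    (hu0 : 0 ≤ u) (hu1 : u < (adj.length : Int))
    (hRange : ∀ x ∈ core, 0 ≤ x ∧ x < (adj.length : Int)) :
    pvB_deg adj core u = pvDeg adj core u := by
  unfold pvB_deg pvDeg
  rw [pvB_adj_eq adj u hu0 hu1]
  apply List.countP_congr
  intro x _
  simp only [decide_eq_true_eq]
  constructor
  · intro h; exact h.2.2
  · intro h; exact ⟨(hRange x h).1, (hRange x h).2, h⟩

theorem pvB_core_spec (adj : List (List Int)) (k : Int) :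
    ∀ core : List Int, (∀ x ∈ core, 0 ≤ x ∧ x < (adj.length : Int)) →
      (∀ u ∈ pvB_core adj k core, (k : Int) ≤ (pvDeg adj (pvB_core adj k core) u : Int))
        ∧ (∀ S, (∀ x ∈ S, x ∈ core) → (∀ u ∈ S, (k : Int) ≤ (pvDeg adj S u : Int)) →
            ∀ x ∈ S, x ∈ pvB_core adj k core) := by
  intro core
  induction core using pvB_core.induct (adj := adj) (k := k) with
  | case1 core hlen =>
    intro hRange
    have hC : pvB_core adj k core = core := by
      rw [pvB_core.eq_def, dif_pos hlen]
    have hall : ∀ u ∈ core, k ≤ (pvB_deg adj core u : Int) := by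
      intro u hu
      have := List.length_filter_eq_length_iff.mp hlen u hu
      simpa using this
    constructor
    · intro u hu
      rw [hC] at hu ⊢
      have := hall u hu
      rwa [pvB_deg_eq adj core u (hRange u hu).1 (hRange u hu).2 hRange] at this
    · intro S hS _ x hx
      rw [hC]
      exact hS x hx
  | case2 core hlen ih =>
    intro hRange
    have hkept : ∀ x ∈ pvB_kept adj k core, x ∈ core := by
      intro x hx
      unfold pvB_kept at hx
      exact List.mem_of_mem_filter hx
    have hkr : ∀ x ∈ pvB_kept adj k core, 0 ≤ x ∧ x < (adj.length : Int) :=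
      fun x hx => hRange x (hkept x hx)
    obtain ⟨ih1, ih2⟩ := ih hkr
    have hC : pvB_core adj k core = pvB_core adj k (pvB_kept adj k core) := by
      rw [pvB_core.eq_def, dif_neg hlen]
    rw [hC]
    refine ⟨ih1, ?_⟩
    intro S hS hdeg x hx
    apply ih2 S ?_ hdeg x hx
    intro y hy
    unfold pvB_kept
    refine List.mem_filter.mpr ⟨hS y hy, ?_⟩
    simp only [decide_eq_true_eq]
    have hmono : pvDeg adj S y ≤ pvDeg adj core y := pvDeg_mono y (fun z hz => hS z hz)
    have hk := hdeg y hy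
    rw [pvB_deg_eq adj core y (hRange y (hS y hy)).1 (hRange y (hS y hy)).2 hRange]
    omega

-- ---------- equality of the two per-layer cores ----------

theorem pv_core_eq (adj : List (List Int)) (k : Int) (R : List Int)
    (hnd : R.Nodup)
    (hRange : ∀ x ∈ R, 0 ≤ x ∧ x < (adj.length : Int))
    (hsym : ∀ u v : Int, 0 ≤ u → u < (adj.length : Int) → v ∈ pvNbrs adj u →
      0 ≤ v → v < (adj.length : Int) → u ∈ pvNbrs adj v) :
    pvDrop R (pvA_peel k R (pvA_subG adj R) R []) = pvB_core adj k R := by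
  obtain ⟨hGoodA, hMaxA⟩ := pvA_core_spec adj k R hnd hRange hsym
  obtain ⟨hDegB, hMaxB⟩ := pvB_core_spec adj k R hRange
  have hsubB := pvB_core_sublist adj k R
  apply pv_sublist_eq R _ _ List.filter_sublist hsubB hnd
  intro x
  constructor
  · intro hx
    exact hMaxB _ hGoodA.1 hGoodA.2 x hx
  · intro hx
    exact hMaxA _ ⟨fun y hy => hsubB.subset hy, hDegB⟩ x hx

-- ---------- traversals compute visited ∪ reachable ----------

-- an edge of the per-layer core graph
def pvE (adj : List (List Int)) (core : List Int) (a b : Int) : Prop :=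
  b ∈ pvNbrs adj a ∧ b ∈ core

-- one exploration step that respects the previously visited set
def pvStep (adj : List (List Int)) (core vis0 : List Int) (a b : Int) : Prop :=
  pvE adj core a b ∧ b ∉ vis0

-- anything reachable lands in an edge-closed set containing the start
theorem pv_closed_reach (adj : List (List Int)) (core : List Int) (F : List Int) (s : Int)
    (hs : s ∈ F) (hcl : ∀ u ∈ F, ∀ b, pvE adj core u b → b ∈ F) :
    ∀ x, Relation.ReflTransGen (pvE adj core) s x → x ∈ F := by
  intro x hx
  induction hx with
  | refl => exact hs
  | tail _ hstep ih => exact hcl _ ih _ hstep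

theorem pvA_scan_complete (core : List Int) :
    ∀ (nbrs vis adds : List Int) (v : Int), v ∈ nbrs → v ∈ core →
      v ∈ (pvA_scan core nbrs vis adds).1 := by
  intro nbrs
  induction nbrs with
  | nil => intro vis adds v hv _; cases hv
  | cons w nbrs ih =>
    intro vis adds v hv hvc
    rcases List.mem_cons.mp hv with rfl | hv'
    · by_cases hw : v ∈ core ∧ v ∉ vis
      · simp only [pvA_scan]; rw [if_pos hw]
        obtain ⟨new', h1', _, _⟩ := pvA_scan_struct core nbrs (v :: vis) (adds ++ [v])
        rw [h1']; simp
      · have hvv : v ∈ vis := by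
          by_contra hcon
          exact hw ⟨hvc, hcon⟩
        obtain ⟨new, h1, _, _⟩ := pvA_scan_struct core (v :: nbrs) vis adds
        rw [h1]; simp [hvv]
    · by_cases hw : w ∈ core ∧ w ∉ vis
      · simp only [pvA_scan]; rw [if_pos hw]
        exact ih (w :: vis) (adds ++ [w]) v hv' hvc
      · simp only [pvA_scan]; rw [if_neg hw]
        exact ih vis adds v hv' hvc

theorem pvA_bfs_spec (adj : List (List Int)) (core : List Int) (R : List Int)
    (subG : PySem.Dict Int (List Int))
    (hGet : ∀ u ∈ R, subG.getD u [] = (pvNbrs adj u).filter (fun v => decide (v ∈ R)))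
    (hcr : ∀ x ∈ core, x ∈ R) (vis0 : List Int) (node : Int) :
    ∀ (queue vis : List Int),
      (∀ x ∈ vis0, x ∈ vis) →
      (∀ u ∈ queue, u ∈ core) →
      (∀ u ∈ queue, u ∈ vis) →
      (∀ u ∈ vis, ∀ b, pvE adj core u b → b ∈ vis ∨ u ∈ queue) →
      (∀ u ∈ vis, u ∈ vis0 ∨ Relation.ReflTransGen (pvStep adj core vis0) node u) →
      (∀ u ∈ queue, Relation.ReflTransGen (pvStep adj core vis0) node u) →
      (∀ x ∈ vis, x ∈ pvA_bfs core subG queue vis)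
        ∧ (∀ u ∈ pvA_bfs core subG queue vis, ∀ b, pvE adj core u b →
            b ∈ pvA_bfs core subG queue vis)
        ∧ (∀ x ∈ pvA_bfs core subG queue vis,
            x ∈ vis0 ∨ Relation.ReflTransGen (pvStep adj core vis0) node x) := by
  intro queue vis
  induction queue, vis using pvA_bfs.induct (core := core) (subG := subG) with
  | case1 vis =>
    intro h0 hqc hqv hcl hvr hqr
    simp only [pvA_bfs]
    refine ⟨fun x hx => hx, ?_, hvr⟩
    intro w hw b hb
    rcases hcl w hw b hb with h | h
    · exact h
    · cases h
  | case2 u queue vis st ih =>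
    intro h0 hqc hqv hcl hvr hqr
    obtain ⟨new, h1, h2, h3⟩ := pvA_scan_struct core (subG.getD u []) vis []
    have h2' : (pvA_scan core (subG.getD u []) vis []).2 = new := by
      rw [h2]; rfl
    have huc : u ∈ core := hqc u List.mem_cons_self
    have huR : u ∈ R := hcr u huc
    have hsubmem : ∀ b, b ∈ subG.getD u [] ↔ b ∈ pvNbrs adj u ∧ b ∈ R := by
      intro b
      rw [hGet u huR]
      simp
    have hvsub : ∀ x ∈ vis, x ∈ (pvA_scan core (subG.getD u []) vis []).1 := by
      intro x hx
      rw [h1]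
      exact List.mem_append_right _ hx
    have hnew : ∀ x ∈ new, x ∈ (pvA_scan core (subG.getD u []) vis []).1 := by
      intro x hx
      rw [h1]
      exact List.mem_append_left _ (by simpa using hx)
    have hrw : pvA_bfs core subG (u :: queue) vis =
        pvA_bfs core subG (queue ++ (pvA_scan core (subG.getD u []) vis []).2)
          (pvA_scan core (subG.getD u []) vis []).1 := by
      simp only [pvA_bfs]
    rw [hrw]
    have hstep : ∀ x ∈ new, Relation.ReflTransGen (pvStep adj core vis0) node x := by
      intro x hx
      obtain ⟨hxc, hxv, hxn⟩ := h3 x hx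
      have hxnb : x ∈ pvNbrs adj u := ((hsubmem x).mp hxn).1
      have hx0 : x ∉ vis0 := fun hh => hxv (h0 x hh)
      exact Relation.ReflTransGen.tail (hqr u List.mem_cons_self) ⟨⟨hxnb, hxc⟩, hx0⟩
    obtain ⟨c1, c2, c3⟩ := ih
      (fun x hx => hvsub x (h0 x hx))
      (by
        intro w hw
        rcases List.mem_append.mp hw with h | h
        · exact hqc w (List.mem_cons_of_mem _ h)
        · rw [h2'] at h; exact (h3 w h).1)
      (by
        intro w hw
        rcases List.mem_append.mp hw with h | h
        · exact hvsub w (hqv w (List.mem_cons_of_mem _ h))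
        · rw [h2'] at h; exact hnew w h)
      (by
        intro w hw b hb
        rw [h1] at hw
        rcases List.mem_append.mp hw with h | h
        · right
          apply List.mem_append_right
          rw [h2']
          simpa using h
        · by_cases hwu : w = u
          · subst hwu
            left
            exact pvA_scan_complete core _ vis [] b ((hsubmem b).mpr ⟨hb.1, hcr b hb.2⟩) hb.2
          · rcases hcl w h b hb with h' | h'
            · exact Or.inl (hvsub b h')
            · rcases List.mem_cons.mp h' with h'' | h''
              · exact absurd h'' hwu
              · exact Or.inr (List.mem_append_left _ h''))
      (by
        intro w hw
        rw [h1] at hw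
        rcases List.mem_append.mp hw with h | h
        · exact Or.inr (hstep w (by simpa using h))
        · exact hvr w h)
      (by
        intro w hw
        rcases List.mem_append.mp hw with h | h
        · exact hqr w (List.mem_cons_of_mem _ h)
        · rw [h2'] at h; exact hstep w h)
    exact ⟨fun x hx => c1 x (hvsub x hx), c2, c3⟩

-- ---------- B's saturation computes the full reachable closure ----------

-- completeness of one inner pass: a qualifying neighbour always ends up in the list
theorem pvB_inner_mem (adj : List (List Int)) (core : List Int) :
    ∀ (l g : List Int) (v : Int), v ∈ l → 0 ≤ v → v < (adj.length : Int) → v ∈ core →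
      v ∈ l.foldl (pvB_add1 adj core) g := by
  intro l
  induction l with
  | nil => intro g v hv _ _ _; cases hv
  | cons w l ih =>
    intro g v hv h0 h1 hc
    simp only [List.foldl_cons]
    rcases List.mem_cons.mp hv with rfl | hv'
    · have hvg : v ∈ pvB_add1 adj core g v := by
        unfold pvB_add1
        split
        · simp
        · rename_i hcond
          push_neg at hcond
          simpa using hcond h0 h1 hc
      obtain ⟨adds, ha, _⟩ := pvB_inner_struct adj core l (pvB_add1 adj core g v)
      rw [ha]
      exact List.mem_append_left _ hvg
    · exact ih _ v hv' h0 h1 hc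

theorem pvB_step_mem (adj : List (List Int)) (core : List Int) :
    ∀ (us g : List Int) (u v : Int), u ∈ us → v ∈ pvB_adj adj u →
      0 ≤ v → v < (adj.length : Int) → v ∈ core →
      v ∈ us.foldl (fun g u => (pvB_adj adj u).foldl (pvB_add1 adj core) g) g := by
  intro us
  induction us with
  | nil => intro g u v hu _ _ _ _; cases hu
  | cons w us ih =>
    intro g u v hu hv h0 h1 hc
    simp only [List.foldl_cons]
    rcases List.mem_cons.mp hu with rfl | hu'
    · have hvg : v ∈ (pvB_adj adj u).foldl (pvB_add1 adj core) g :=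
        pvB_inner_mem adj core _ g v hv h0 h1 hc
      obtain ⟨adds, ha, _⟩ := pvB_outer_struct adj core us ((pvB_adj adj u).foldl (pvB_add1 adj core) g)
      rw [ha]
      exact List.mem_append_left _ hvg
    · exact ih _ u v hu' hv h0 h1 hc

theorem pvB_close_spec (adj : List (List Int)) (core : List Int)
    (hcR : ∀ x ∈ core, 0 ≤ x ∧ x < (adj.length : Int)) (s : Int) :
    ∀ comp : List Int, (∀ x ∈ comp, x ∈ core) →
      (∀ x ∈ comp, Relation.ReflTransGen (pvE adj core) s x) →
      (∀ x ∈ comp, x ∈ pvB_close adj core comp)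
        ∧ (∀ u ∈ pvB_close adj core comp, ∀ b, pvE adj core u b →
            b ∈ pvB_close adj core comp)
        ∧ (∀ x ∈ pvB_close adj core comp,
            Relation.ReflTransGen (pvE adj core) s x) := by
  intro comp
  induction comp using pvB_close.induct (adj := adj) (core := core) with
  | case1 comp hfix =>
    intro hsub hreach
    have hC : pvB_close adj core comp = comp := by
      rw [pvB_close.eq_def, dif_pos hfix]
    rw [hC]
    refine ⟨fun x hx => hx, ?_, hreach⟩
    intro u hu b hb
    obtain ⟨adds, h1, h2⟩ := pvB_outer_struct adj core comp comp
    have hstep : pvB_step adj core comp = comp ++ adds := h1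
    have hadds : adds = [] := by
      have := congrArg List.length hstep
      simp only [List.length_append] at this
      rcases adds with _ | _
      · rfl
      · exfalso; rw [hstep] at hfix; simp at hfix
    have hfixeq : pvB_step adj core comp = comp := by rw [hstep, hadds, List.append_nil]
    have hbr := hcR b hb.2
    have hur := hcR u (hsub u hu)
    have hbstep : b ∈ pvB_step adj core comp := by
      unfold pvB_step
      apply pvB_step_mem adj core comp comp u b hu ?_ hbr.1 hbr.2 hb.2
      rw [pvB_adj_eq adj u hur.1 hur.2]
      exact hb.1
    rwa [hfixeq] at hbstep
  | case2 comp hfix ih =>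
    intro hsub hreach
    obtain ⟨adds, h1, h2⟩ := pvB_outer_struct adj core comp comp
    have hstep : pvB_step adj core comp = comp ++ adds := h1
    have hsub' : ∀ x ∈ pvB_step adj core comp, x ∈ core := by
      intro x hx
      rw [hstep] at hx
      rcases List.mem_append.mp hx with h | h
      · exact hsub x h
      · exact (h2 x h).1
    have hreach' : ∀ x ∈ pvB_step adj core comp, Relation.ReflTransGen (pvE adj core) s x := by
      intro x hx
      rw [hstep] at hx
      rcases List.mem_append.mp hx with h | h
      · exact hreach x h
      · obtain ⟨hxc, _, u, hu, hxu⟩ := h2 x h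
        have hur := hcR u (hsub u hu)
        rw [pvB_adj_eq adj u hur.1 hur.2] at hxu
        exact Relation.ReflTransGen.tail (hreach u hu) ⟨hxu, hxc⟩
    have hC : pvB_close adj core comp = pvB_close adj core (pvB_step adj core comp) := by
      rw [pvB_close.eq_def, dif_neg hfix]
    rw [hC]
    obtain ⟨c1, c2, c3⟩ := ih hsub' hreach'
    refine ⟨?_, c2, c3⟩
    intro x hx
    apply c1
    rw [hstep]
    exact List.mem_append_left _ hx

-- ---------- the component-counting passes agree ----------

theorem pv_comps_eq (adj : List (List Int)) (core R : List Int)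
    (subG : PySem.Dict Int (List Int))
    (hGet : ∀ u ∈ R, subG.getD u [] = (pvNbrs adj u).filter (fun v => decide (v ∈ R)))
    (hcr : ∀ x ∈ core, x ∈ R)
    (hcR : ∀ x ∈ core, 0 ≤ x ∧ x < (adj.length : Int)) :
    ∀ (nodes visA visB : List Int) (cnt : Int),
      (∀ u ∈ nodes, u ∈ core) →
      (∀ x, x ∈ visA ↔ x ∈ visB) →
      (∀ u ∈ visA, ∀ b, pvE adj core u b → b ∈ visA) →
      pvA_comps core subG nodes visA cnt =
        (nodes.foldl (fun st s =>
          if s ∈ st.1 then st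
          else (st.1 ++ (pvB_close adj core [s]).filter (fun x => decide (x ∉ st.1)), st.2 + 1))
          (visB, cnt)).2 := by
  intro nodes
  induction nodes with
  | nil =>
    intro visA visB cnt _ _ _
    simp [pvA_comps]
  | cons node rest ih =>
    intro visA visB cnt hnc hvv hclosed
    have hnodec : node ∈ core := hnc node List.mem_cons_self
    simp only [List.foldl_cons]
    by_cases hmem : node ∈ visA
    · have hmemB : node ∈ visB := (hvv node).mp hmem
      simp only [pvA_comps]
      rw [if_pos hmem, if_pos hmemB]
      exact ih visA visB cnt (fun u hu => hnc u (List.mem_cons_of_mem _ hu)) hvv hclosed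
    · have hmemB : node ∉ visB := fun h => hmem ((hvv node).mpr h)
      simp only [pvA_comps]
      rw [if_neg hmem, if_neg hmemB]
      obtain ⟨hA1, hA2, hA3⟩ := pvA_bfs_spec adj core R subG hGet hcr visA node
        [node] (node :: visA)
        (fun x hx => List.mem_cons_of_mem _ hx)
        (fun u hu => by rw [List.mem_singleton.mp hu]; exact hnodec)
        (fun u hu => by rw [List.mem_singleton.mp hu]; exact List.mem_cons_self)
        (by
          intro w hw b hb
          rcases List.mem_cons.mp hw with rfl | hw'
          · exact Or.inr List.mem_cons_self
          · exact Or.inl (List.mem_cons_of_mem _ (hclosed w hw' b hb)))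
        (by
          intro w hw
          rcases List.mem_cons.mp hw with rfl | hw'
          · exact Or.inr Relation.ReflTransGen.refl
          · exact Or.inl hw')
        (fun u hu => by cases List.mem_singleton.mp hu; exact Relation.ReflTransGen.refl)
      obtain ⟨hC1, hC2, hC3⟩ := pvB_close_spec adj core hcR node [node]
        (fun x hx => by rw [List.mem_singleton.mp hx]; exact hnodec)
        (fun x hx => by rw [List.mem_singleton.mp hx])
      have hnodeC : node ∈ pvB_close adj core [node] := hC1 node List.mem_cons_self
      -- membership in B's grown visited list
      have hBmem : ∀ x, x ∈ visB ++ (pvB_close adj core [node]).filter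
          (fun x => decide (x ∉ visB)) ↔ x ∈ visB ∨ x ∈ pvB_close adj core [node] := by
        intro x
        simp only [List.mem_append, List.mem_filter, decide_eq_true_eq]
        constructor
        · rintro (h | ⟨h, _⟩)
          · exact Or.inl h
          · exact Or.inr h
        · rintro (h | h)
          · exact Or.inl h
          · by_cases hxv : x ∈ visB
            · exact Or.inl hxv
            · exact Or.inr ⟨h, hxv⟩
      -- B's grown visited list is edge-closed
      have hBclosed : ∀ u, (u ∈ visB ∨ u ∈ pvB_close adj core [node]) →
          ∀ b, pvE adj core u b → b ∈ visB ∨ b ∈ pvB_close adj core [node] := by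
        intro u hu b hb
        rcases hu with hu | hu
        · exact Or.inl ((hvv b).mp (hclosed u ((hvv u).mpr hu) b hb))
        · exact Or.inr (hC2 u hu b hb)
      have hFm : ∀ x, x ∈ pvA_bfs core subG [node] (node :: visA) ↔
          (x ∈ visB ∨ x ∈ pvB_close adj core [node]) := by
        intro x
        constructor
        · intro hx
          rcases hA3 x hx with h | h
          · exact Or.inl ((hvv x).mp h)
          · have hxF : x ∈ visB ++ (pvB_close adj core [node]).filter
                (fun x => decide (x ∉ visB)) :=
              pv_closed_reach adj core _ node ((hBmem node).mpr (Or.inr hnodeC))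
                (fun u hu b hb => (hBmem b).mpr (hBclosed u ((hBmem u).mp hu) b hb)) x
                (Relation.ReflTransGen.mono (fun _ _ hs => hs.1) h)
            exact (hBmem x).mp hxF
        · intro hx
          rcases hx with h | h
          · exact hA1 x (List.mem_cons_of_mem _ ((hvv x).mpr h))
          · exact pv_closed_reach adj core _ node (hA1 node List.mem_cons_self) hA2 x (hC3 x h)
      have hvv' : ∀ x, x ∈ pvA_bfs core subG [node] (node :: visA) ↔
          x ∈ visB ++ (pvB_close adj core [node]).filter (fun x => decide (x ∉ visB)) := by
        intro x
        rw [hFm x, hBmem x]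
      exact ih _ _ (cnt + 1) (fun u hu => hnc u (List.mem_cons_of_mem _ hu)) hvv' hA2

-- B's per-layer component pass, unfolded to the fold used in pv_comps_eq
theorem pvB_comps_eq_foldl (adj : List (List Int)) (core vis : List Int) (cnt : Int) :
    pvB_comps adj core vis cnt =
      core.foldl (fun st s =>
        if s ∈ st.1 then st
        else (st.1 ++ (pvB_close adj core [s]).filter (fun x => decide (x ∉ st.1)), st.2 + 1))
        (vis, cnt) := rfl

-- ---------- the layer loops agree ----------

theorem pv_layers_eq (adj : List (List Int)) (k : Int)
    (hsym : ∀ u v : Int, 0 ≤ u → u < (adj.length : Int) → v ∈ pvNbrs adj u →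
      0 ≤ v → v < (adj.length : Int) → u ∈ pvNbrs adj v) :
    ∀ (R : List Int), R.Nodup → (∀ x ∈ R, 0 ≤ x ∧ x < (adj.length : Int)) →
      ∀ cnt : Int, pvA_layers adj k R cnt = pvB_layers adj k R cnt := by
  have key : ∀ (n : Nat) (R : List Int), R.length = n → R.Nodup →
      (∀ x ∈ R, 0 ≤ x ∧ x < (adj.length : Int)) →
      ∀ cnt : Int, pvA_layers adj k R cnt = pvB_layers adj k R cnt := by
    intro n
    induction n using Nat.strong_induction_on with
    | _ n ihn =>
      intro R hlen hnd hRange cnt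
      rw [pvA_layers.eq_def, pvB_layers.eq_def]
      by_cases hR : R = []
      · rw [dif_pos hR, dif_pos hR]
      · rw [dif_neg hR, dif_neg hR]
        have hcoreq := pv_core_eq adj k R hnd hRange hsym
        have hGet := fun u hu => pv_subG_getD adj R u hu
        by_cases hc : pvDrop R (pvA_peel k R (pvA_subG adj R) R []) = []
        · rw [dif_pos hc, dif_pos (hcoreq ▸ hc)]
        · rw [dif_neg hc, dif_neg (hcoreq ▸ hc)]
          rw [← hcoreq]
          have hcsub : ∀ x ∈ pvDrop R (pvA_peel k R (pvA_subG adj R) R []), x ∈ R :=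
            fun x hx => (pvDrop_mem.mp hx).1
          have hcomps := pv_comps_eq adj (pvDrop R (pvA_peel k R (pvA_subG adj R) R [])) R
            (pvA_subG adj R) hGet hcsub (fun x hx => hRange x (hcsub x hx))
            (pvDrop R (pvA_peel k R (pvA_subG adj R) R [])) [] [] cnt
            (fun u hu => hu) (fun x => Iff.rfl) (fun u hu => absurd hu List.not_mem_nil)
          rw [pvB_comps_eq_foldl, ← hcomps]
          obtain ⟨x, hxc⟩ := List.exists_mem_of_ne_nil _ hc
          apply ihn ((pvDrop R (pvDrop R (pvA_peel k R (pvA_subG adj R) R []))).length)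
          · have := pvDrop_length_lt hxc (pvDrop_subset hxc)
            omega
          · rfl
          · exact List.Nodup.filter _ hnd
          · intro y hy
            exact hRange y (pvDrop_subset hy)
  intro R hnd hRange cnt
  exact key R.length R rfl hnd hRange cnt

-- ---------- the degenerate thresholds: k ≤ 0 and k above every in-range degree ----------

theorem pvA_peel_nodel (k : Int) (R : List Int) (subG : PySem.Dict Int (List Int))
    (hk : k ≤ 0) : ∀ (queue deleted : List Int), pvA_peel k R subG queue deleted = deleted := by
  intro queue deleted
  induction queue, deleted using pvA_peel.induct (k := k) (R := R) (subG := subG) with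
  | case1 deleted => simp only [pvA_peel]
  | case2 u queue deleted h ih =>
    simp only [pvA_peel]
    rw [if_pos h]
    exact ih
  | case3 u queue deleted h cur hlt ih =>
    exfalso
    have h0 : (0 : Int) ≤ (cur.length : Int) := by positivity
    omega
  | case4 u queue deleted h cur hge ih =>
    simp only [pvA_peel]
    rw [if_neg h, if_neg hge]
    exact ih

theorem pvDrop_nil_right (R : List Int) : pvDrop R [] = R := by
  unfold pvDrop
  apply List.filter_eq_self.mpr
  intro x _
  simp

theorem pvDrop_self (R : List Int) : pvDrop R R = [] := by
  unfold pvDrop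
  apply List.filter_eq_nil_iff.mpr
  intro x hx
  simp [hx]

theorem pvB_core_nonpos (adj : List (List Int)) (k : Int) (hk : k ≤ 0) (core : List Int) :
    pvB_core adj k core = core := by
  rw [pvB_core.eq_def, dif_pos ?_]
  unfold pvB_kept
  apply List.length_filter_eq_length_iff.mpr
  intro u _
  simp only [decide_eq_true_eq]
  have h0 : (0 : Int) ≤ (pvB_deg adj core u : Int) := by positivity
  omega

theorem pv_layers_eq_nonpos (adj : List (List Int)) (k : Int) (hk : k ≤ 0) :
    ∀ (R : List Int), (∀ x ∈ R, 0 ≤ x ∧ x < (adj.length : Int)) →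
      ∀ cnt : Int, pvA_layers adj k R cnt = pvB_layers adj k R cnt := by
  intro R hRange cnt
  rw [pvA_layers.eq_def, pvB_layers.eq_def]
  by_cases hR : R = []
  · rw [dif_pos hR, dif_pos hR]
  · rw [dif_neg hR, dif_neg hR]
    have hA : pvDrop R (pvA_peel k R (pvA_subG adj R) R []) = R := by
      rw [pvA_peel_nodel k R _ hk, pvDrop_nil_right]
    have hB : pvB_core adj k R = R := pvB_core_nonpos adj k hk R
    have hA' : ¬ (pvDrop R (pvA_peel k R (pvA_subG adj R) R []) = []) := by
      rw [hA]; exact hR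
    have hB' : ¬ (pvB_core adj k R = []) := by
      rw [hB]; exact hR
    rw [dif_neg hA', dif_neg hB']
    rw [hA, hB]
    have hGet := fun u hu => pv_subG_getD adj R u hu
    have hcomps := pv_comps_eq adj R R (pvA_subG adj R) hGet (fun x hx => hx) hRange
      R [] [] cnt (fun u hu => hu) (fun x => Iff.rfl) (fun u hu => absurd hu List.not_mem_nil)
    rw [pvB_comps_eq_foldl, ← hcomps, pvDrop_self]
    rw [pvA_layers.eq_def, pvB_layers.eq_def, dif_pos rfl, dif_pos rfl]

theorem pvA_peel_all (adj : List (List Int)) (k : Int) (R : List Int)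
    (subG : PySem.Dict Int (List Int))
    (hGet : ∀ u ∈ R, subG.getD u [] = (pvNbrs adj u).filter (fun v => decide (v ∈ R)))
    (hRange : ∀ x ∈ R, 0 ≤ x ∧ x < (adj.length : Int))
    (hbig : ∀ u : Int, 0 ≤ u → u < (adj.length : Int) →
      (((pvNbrs adj u).countP (fun v => decide (0 ≤ v ∧ v < (adj.length : Int)))) : Int) < k) :
    ∀ (queue deleted : List Int),
      (∀ x ∈ deleted, x ∈ pvA_peel k R subG queue deleted)
        ∧ (∀ w ∈ queue, w ∈ R → w ∈ pvA_peel k R subG queue deleted) := by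
  intro queue deleted
  induction queue, deleted using pvA_peel.induct (k := k) (R := R) (subG := subG) with
  | case1 deleted =>
    simp only [pvA_peel]
    exact ⟨fun x hx => hx, fun w hw => absurd hw List.not_mem_nil⟩
  | case2 u queue deleted h ih =>
    simp only [pvA_peel]
    rw [if_pos h]
    refine ⟨ih.1, ?_⟩
    intro w hw hwR
    rcases List.mem_cons.mp hw with rfl | hw'
    · rcases h with h | h
      · exact ih.1 w h
      · exact absurd hwR h
    · exact ih.2 w hw' hwR
  | case3 u queue deleted h cur hlt ih =>
    simp only [pvA_peel]
    rw [if_neg h, if_pos hlt]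
    refine ⟨fun x hx => ih.1 x (List.mem_cons_of_mem _ hx), ?_⟩
    intro w hw hwR
    rcases List.mem_cons.mp hw with rfl | hw'
    · exact ih.1 w List.mem_cons_self
    · exact ih.2 w (List.mem_append_left _ hw') hwR
  | case4 u queue deleted h cur hge ih =>
    exfalso
    push_neg at h
    obtain ⟨huD, huR⟩ := h
    have h0 := (hRange u huR).1
    have h1 : u.toNat < adj.length := by
      have := (hRange u huR).2
      omega
    have hlen1 : cur.length ≤ (subG.getD u []).length := List.length_filter_le _ _
    have hlen2 : (subG.getD u []).length =
        (pvNbrs adj u).countP (fun v => decide (v ∈ R)) := by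
      rw [hGet u huR]
      exact List.countP_eq_length_filter.symm
    have hlen3 : (pvNbrs adj u).countP (fun v => decide (v ∈ R)) ≤
        (pvNbrs adj u).countP (fun v => decide (0 ≤ v ∧ v < (adj.length : Int))) := by
      apply List.countP_mono_left
      intro x _ hx
      simp only [decide_eq_true_eq] at hx ⊢
      exact hRange x hx
    have hlen4 := hbig u h0 (by omega)
    have hge' : ¬ ((cur.length : Int) < k) := hge
    omega

theorem pvB_core_big (adj : List (List Int)) (k : Int)
    (hbig : ∀ u : Int, 0 ≤ u → u < (adj.length : Int) →
      (((pvNbrs adj u).countP (fun v => decide (0 ≤ v ∧ v < (adj.length : Int)))) : Int) < k) :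
    ∀ (R : List Int), (∀ x ∈ R, 0 ≤ x ∧ x < (adj.length : Int)) → R ≠ [] →
      pvB_core adj k R = [] := by
  intro R hRange hR
  have hkept : pvB_kept adj k R = [] := by
    unfold pvB_kept
    apply List.filter_eq_nil_iff.mpr
    intro u hu
    simp only [decide_eq_true_eq]
    have h0 := (hRange u hu).1
    have h1 : u.toNat < adj.length := by
      have := (hRange u hu).2
      omega
    have hle : pvB_deg adj R u ≤
        (pvNbrs adj u).countP (fun v => decide (0 ≤ v ∧ v < (adj.length : Int))) := by
      unfold pvB_deg
      rw [pvB_adj_eq adj u h0 (hRange u hu).2]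
      apply List.countP_mono_left
      intro x _ hx
      simp only [decide_eq_true_eq] at hx ⊢
      exact ⟨hx.1, hx.2.1⟩
    have hlt := hbig u h0 (by omega)
    omega
  have hlen : ¬ ((pvB_kept adj k R).length = R.length) := by
    rw [hkept]
    intro hcon
    exact hR (List.eq_nil_of_length_eq_zero hcon.symm)
  rw [pvB_core.eq_def, dif_neg hlen, hkept]
  rw [pvB_core.eq_def, dif_pos (by simp [pvB_kept])]

theorem pv_layers_eq_big (adj : List (List Int)) (k : Int)
    (hbig : ∀ u : Int, 0 ≤ u → u < (adj.length : Int) →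
      (((pvNbrs adj u).countP (fun v => decide (0 ≤ v ∧ v < (adj.length : Int)))) : Int) < k) :
    ∀ (R : List Int), (∀ x ∈ R, 0 ≤ x ∧ x < (adj.length : Int)) →
      ∀ cnt : Int, pvA_layers adj k R cnt = pvB_layers adj k R cnt := by
  intro R hRange cnt
  rw [pvA_layers.eq_def, pvB_layers.eq_def]
  by_cases hR : R = []
  · rw [dif_pos hR, dif_pos hR]
  · rw [dif_neg hR, dif_neg hR]
    have hGet := fun u hu => pv_subG_getD adj R u hu
    have hA : pvDrop R (pvA_peel k R (pvA_subG adj R) R []) = [] := by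
      unfold pvDrop
      apply List.filter_eq_nil_iff.mpr
      intro x hx
      simp only [decide_eq_true_eq, not_not]
      exact (pvA_peel_all adj k R _ hGet hRange hbig R []).2 x hx hx
    have hB : pvB_core adj k R = [] := pvB_core_big adj k hbig R hRange hR
    rw [dif_pos hA, dif_pos hB]

theorem pv_layers_eq_sym (adj : List (List Int)) (k : Int)
    (hpre : ∀ i < adj.length, ∀ v ∈ adj[i]!, 0 ≤ v → v < (adj.length : Int) →
      (i : Int) ∈ adj[v.toNat]!) :
    ∀ (R : List Int), R.Nodup → (∀ x ∈ R, 0 ≤ x ∧ x < (adj.length : Int)) →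
      ∀ cnt : Int, pvA_layers adj k R cnt = pvB_layers adj k R cnt := by
  have hsym : ∀ u v : Int, 0 ≤ u → u < (adj.length : Int) → v ∈ pvNbrs adj u →
      0 ≤ v → v < (adj.length : Int) → u ∈ pvNbrs adj v := by
    intro u v hu0 hun hv hv0 hvn
    have hut : u.toNat < adj.length := by omega
    have hvt : v.toNat < adj.length := by omega
    rw [pvNbrs_eq_getElem adj u hu0 hut] at hv
    have h := hpre u.toNat hut v (by rwa [getElem!_pos adj u.toNat hut]) hv0 hvn
    rw [getElem!_pos adj v.toNat hvt] at h
    rw [pvNbrs_eq_getElem adj v hv0 hvt]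
    rwa [Int.toNat_of_nonneg hu0] at h
  exact pv_layers_eq adj k hsym

theorem pv_main (adj : List (List Int)) (k : Int)
    (hpre : Pre_count_k_cores_alternative_py adj k) :
    count_k_cores_alternative_py adj k = count_k_cores_alternative_py_alt adj k := by
  unfold count_k_cores_alternative_py count_k_cores_alternative_py_alt
  by_cases hn : adj.length = 0
  · rw [if_pos hn]
    rw [pvB_layers.eq_def, dif_pos (by rw [hn]; simp [PySem.List.pyRange_one_eq_nil])]
  · rw [if_neg hn]
    have hRange : ∀ x ∈ PySem.List.pyRange 0 (adj.length : Int) 1,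
        0 ≤ x ∧ x < (adj.length : Int) := by
      intro x hx
      have := PySem.List.mem_pyRange_one.mp hx
      omega
    rcases hpre with hsympre | hk | hbig
    · exact pv_layers_eq_sym adj k hsympre _
        (PySem.List.nodup_pyRange_one 0 (adj.length : Int)) hRange 0
    · exact pv_layers_eq_nonpos adj k hk _ hRange 0
    · apply pv_layers_eq_big adj k ?_ _ hRange 0
      intro u h0 h1
      have hut : u.toNat < adj.length := by omega
      have hb := hbig u.toNat hut
      rw [getElem!_pos adj u.toNat hut] at hb
      rwa [pvNbrs_eq_getElem adj u h0 hut]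

-- ===== VERDICT (by name: the statement is the Claim_ definition above) =====
theorem count_k_cores_alternative_py_spec : Claim_equal_count_k_cores_alternative_py := by
  intro adj k _ hpre
  unfold Spec_count_k_cores_alternative_py
  exact pv_main adj k hpre
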